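-- pv_equiv track=rewrite | github.com/jorgelisboa/Gauss | Main.py | changeLines
-- ===== SOURCE A (Python) =====
-- def permuta (linha, perm, perms):
--     if linha==[]:
--         perms.append(perm)
--     else:
--         for lin in range(len(linha)):
--             permuta(linha[0:lin]+linha[lin+1:len(linha)],perm+[linha[lin]],perms)
--
-- def permutacoes (linha):
--     perms=[]
--     permuta(linha,[],perms)
--     return perms
--
-- def haZeroNaDiagonal (m,ordL,ordC):
--     qtdDeZeros=0
--     posicao=0
--     while posicao<len(m):
--         if m[ordL[posicao]][ordC[posicao]]==0: qtdDeZeros+=1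
--         posicao+=1
--     return qtdDeZeros>0
--
-- def comoSeLivrarDeZerosNaDiagonal (m):
--     perms = permutacoes(list(range(len(m))))
--
--     for i in range(len(perms)):
--         for j in range(len(perms)):
--             if not haZeroNaDiagonal(m,perms[i],perms[j]):
--                 return [perms[i],perms[j]];
--
-- def changeLines(matriz):
--     counter = 0
--     ordemMatriz = comoSeLivrarDeZerosNaDiagonal(matriz)
--     matrizZerada = []
--     while counter < len(ordemMatriz[1]):
--         matrizZerada.append(matriz[ordemMatriz[1][counter]])
--         counter+=1
--     return matrizZerada
-- ===== SOURCE B (Python) =====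
-- def changeLines(matriz):
--     n = len(matriz)
--
--     def search(k, cols):
--         # first (in lexicographic order) assignment of the remaining columns
--         # to rows k.. with a nonzero entry on each picked position, or None
--         if not cols:
--             return []
--         for i in range(len(cols)):
--             if matriz[k][cols[i]] != 0:
--                 rest = search(k + 1, cols[:i] + cols[i + 1:])
--                 if rest is not None:
--                     return [cols[i]] + rest
--         return None
--
--     q = search(0, list(range(n)))
--     return [matriz[c] for c in q]
-- ===== Notes on version B (the rewrite author's own statement) =====
-- stated objective: faster
-- what changed: A eagerly builds the list of all n! permutations and scans all (n!)^2 (row-order, column-order) pairs, re-testing the whole diagonal for each pair; B does a single backtracking depth-first search over column choices in lexicographic order (the identity row order always works when any pair does), pruning a branch as soon as it hits a zero entry.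
-- outside the precondition, e.g. on changeLines([[1], [2, 3]]): A returns [[1], [2, 3]], B returns [[1], [2, 3]]; on changeLines([[1, 2], [1]]): A raises IndexError, B raises IndexError; on changeLines([[0, 0], [1, 1]]): A raises TypeError, B raises TypeError
import Mathlib
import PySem

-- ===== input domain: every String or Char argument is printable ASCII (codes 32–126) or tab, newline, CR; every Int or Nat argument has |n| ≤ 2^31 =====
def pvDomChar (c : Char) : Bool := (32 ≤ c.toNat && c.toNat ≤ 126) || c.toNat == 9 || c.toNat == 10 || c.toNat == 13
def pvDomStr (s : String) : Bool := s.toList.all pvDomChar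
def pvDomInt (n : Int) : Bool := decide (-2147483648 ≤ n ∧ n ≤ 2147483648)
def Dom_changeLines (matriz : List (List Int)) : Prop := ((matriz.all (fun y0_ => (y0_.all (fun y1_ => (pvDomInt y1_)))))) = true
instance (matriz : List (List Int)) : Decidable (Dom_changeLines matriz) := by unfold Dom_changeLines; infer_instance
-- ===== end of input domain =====

-- B replaces A's scan of all (n!)^2 pairs of row/column permutations by a single
-- pruned lexicographic depth-first search over column choices (identity row order
-- always suffices); equivalence of the RETURN values is proved on Pre_.

-- slice bridge used by the ports' termination proofs (cited in decreasing_by)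
theorem slice_pair_eq_eraseIdx (l : List Int) (i : Nat) :
    PySem.List.slice l (some 0) (some (i : Int)) ++
      PySem.List.slice l (some ((i : Int) + 1)) (some (l.length : Int)) = l.eraseIdx i := by
  have h1 : ((i : Int) + 1) = ((i + 1 : Nat) : Int) := by push_cast; ring
  rw [h1, PySem.List.slice_zero_start, PySem.List.slice_to_natCast, PySem.List.slice_natCast,
    List.eraseIdx_eq_take_drop_succ]
  congr 1
  exact List.take_of_length_le (by simp)

-- ===== PORT A =====
-- permuta(linha, perm, perms): recursion on linha; linha[0:lin]+linha[lin+1:len] via PySem slices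
def permuta (linha : List Int) (perm : List Int) (perms : List (List Int)) : List (List Int) :=
  if linha = [] then perms ++ [perm]
  else (List.range linha.length).attach.foldl
    (fun acc i =>
      permuta
        (PySem.List.slice linha (some 0) (some (i.1 : Int)) ++
         PySem.List.slice linha (some ((i.1 : Int) + 1)) (some (linha.length : Int)))
        (perm ++ [PySem.List.pyGetD linha (i.1 : Int) 0]) acc)
    perms
termination_by linha.length
decreasing_by
  have hi : i.1 < linha.length := by simpa [List.mem_range] using i.2
  rw [slice_pair_eq_eraseIdx]
  simp [List.length_eraseIdx, hi]
  omega

def permutacoes (linha : List Int) : List (List Int) := permuta linha [] []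

-- while posicao < len(m): count zeros at m[ordL[pos]][ordC[pos]]
def haZeroNaDiagonal (m : List (List Int)) (ordL ordC : List Int) : Bool :=
  decide (0 < (List.range m.length).foldl
    (fun (qtd : Int) (pos : Nat) =>
      if PySem.List.pyGetD (PySem.List.pyGetD m (PySem.List.pyGetD ordL (pos : Int) 0) [])
           (PySem.List.pyGetD ordC (pos : Int) 0) 0 = 0
      then qtd + 1 else qtd) (0 : Int))

-- nested for-loops with early return → findSome?/find? over the same list
def comoSeLivrarDeZerosNaDiagonal (m : List (List Int)) : Option (List Int × List Int) :=
  let perms := permutacoes (PySem.List.pyRange 0 (m.length : Int) 1)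
  perms.findSome? (fun p =>
    (perms.find? (fun q => !haZeroNaDiagonal m p q)).map (fun q => (p, q)))

def changeLines (matriz : List (List Int)) : List (List Int) :=
  match comoSeLivrarDeZerosNaDiagonal matriz with
  | none => []   -- Python raises TypeError here (None subscripted); excluded by Pre_
  | some ordem =>
    (List.range ordem.2.length).foldl
      (fun (acc : List (List Int)) (counter : Nat) =>
        acc ++ [PySem.List.pyGetD matriz (PySem.List.pyGetD ordem.2 (counter : Int) 0) []])
      []

-- ===== PORT B =====
-- search(k, cols): first assignment in lexicographic DFS order, pruning zero entries
def searchB (matriz : List (List Int)) (k : Nat) (cols : List Int) : Option (List Int) :=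
  if cols = [] then some []
  else (List.range cols.length).attach.findSome? (fun i =>
    if PySem.List.pyGetD (PySem.List.pyGetD matriz (k : Int) [])
         (PySem.List.pyGetD cols (i.1 : Int) 0) 0 ≠ 0 then
      (searchB matriz (k + 1)
        (PySem.List.slice cols (some 0) (some (i.1 : Int)) ++
         PySem.List.slice cols (some ((i.1 : Int) + 1)) (some (cols.length : Int)))).map
        (fun rest => PySem.List.pyGetD cols (i.1 : Int) 0 :: rest)
    else none)
termination_by cols.length
decreasing_by
  have hi : i.1 < cols.length := by simpa [List.mem_range] using i.2
  rw [slice_pair_eq_eraseIdx]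
  simp [List.length_eraseIdx, hi]
  omega

def changeLines_alt (matriz : List (List Int)) : List (List Int) :=
  match searchB matriz 0 (PySem.List.pyRange 0 (matriz.length : Int) 1) with
  | none => []   -- Python raises TypeError here (iterating None); excluded by Pre_
  | some q => q.map (fun c => PySem.List.pyGetD matriz c [])

-- ===== PRECONDITION & SPEC =====
-- Pre_ excludes inputs on which A raises: matrices with no zero-free diagonal
-- permutation (A's search returns None and changeLines raises TypeError) and ragged
-- matrices with a row shorter than the matrix, on which A's full diagonal test
-- generally raises IndexError (this also excludes a few staircase-shaped ragged
-- matrices on which A happens to return before reaching a short row).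
def Pre_changeLines (matriz : List (List Int)) : Prop :=
  (∀ row ∈ matriz, matriz.length ≤ row.length) ∧
  ∃ q ∈ (List.range matriz.length).permutations,
    ∀ i < matriz.length, (matriz.getD i []).getD (q.getD i 0) 0 ≠ 0
instance (matriz : List (List Int)) : Decidable (Pre_changeLines matriz) := by
  unfold Pre_changeLines; infer_instance

def pvWitness_changeLines : List (List Int) := [[1, 2], [3, 4]]

def Spec_changeLines (matriz : List (List Int)) (out : List (List Int)) : Prop := out = changeLines_alt matriz
instance (matriz : List (List Int)) (out : List (List Int)) : Decidable (Spec_changeLines matriz out) := by unfold Spec_changeLines; infer_instance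

-- ===== CLAIM (what is proved, stated in full; the proofs are below) =====
def Claim_equal_changeLines : Prop := ∀ (matriz : List (List Int)), Dom_changeLines matriz → Pre_changeLines matriz → Spec_changeLines matriz (changeLines matriz)

-- ===== LEMMAS AND PROOFS =====

-- the list of permutations of l in the order permuta generates them
def gen (l : List Int) : List (List Int) :=
  if l = [] then [[]]
  else ((List.range l.length).attach.map
    (fun i => (gen (l.eraseIdx i.1)).map (fun t => l.getD i.1 0 :: t))).flatten
termination_by l.length
decreasing_by
  have hi : i.1 < l.length := by
    have := i.2; simpa [List.mem_range] using this
  simp [List.length_eraseIdx, hi]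
  omega

-- diagonal-nonzero test as structural recursion (B's traversal order)
def okB (m : List (List Int)) (k : Nat) (q : List Int) : Bool :=
  match q with
  | [] => true
  | c :: t =>
    if PySem.List.pyGetD (PySem.List.pyGetD m (k : Int) []) c 0 = 0 then false
    else okB m (k + 1) t

theorem permuta_eq_gen_aux (n : Nat) :
    ∀ linha : List Int, linha.length ≤ n → ∀ perm perms,
      permuta linha perm perms = perms ++ (gen linha).map (fun t => perm ++ t) := by
  induction n with
  | zero =>
    intro linha hl perm perms
    have : linha = [] := List.eq_nil_of_length_eq_zero (Nat.le_zero.mp hl)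
    subst this
    simp [permuta, gen]
  | succ n ih =>
    intro linha hl perm perms
    by_cases h : linha = []
    · subst h; simp [permuta, gen]
    · rw [permuta, gen]
      simp only [if_neg h]
      have hF : (fun (acc : List (List Int)) (i : {x // x ∈ List.range linha.length}) =>
            permuta
              (PySem.List.slice linha (some 0) (some (i.1 : Int)) ++
               PySem.List.slice linha (some ((i.1 : Int) + 1)) (some (linha.length : Int)))
              (perm ++ [PySem.List.pyGetD linha (i.1 : Int) 0]) acc)
          = (fun acc i =>
              permuta (linha.eraseIdx i.1) (perm ++ [linha.getD i.1 0]) acc) := by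
        funext acc i
        rw [slice_pair_eq_eraseIdx, PySem.List.pyGetD_natCast]
      rw [hF]
      have aux : ∀ (L : List {x // x ∈ List.range linha.length}) (acc : List (List Int)),
          L.foldl (fun acc i => permuta (linha.eraseIdx i.1) (perm ++ [linha.getD i.1 0]) acc) acc
          = acc ++ (L.map (fun i => (gen (linha.eraseIdx i.1)).map
              (fun t => perm ++ (linha.getD i.1 0 :: t)))).flatten := by
        intro L
        induction L with
        | nil => intro acc; simp
        | cons i L ihL =>
          intro acc
          have hi : i.1 < linha.length := by simpa [List.mem_range] using i.2
          have hlen : (linha.eraseIdx i.1).length ≤ n := by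
            simp [List.length_eraseIdx, hi]; omega
          simp only [List.foldl_cons, List.map_cons, List.flatten_cons]
          rw [ihL, ih _ hlen]
          have : ((gen (linha.eraseIdx i.1)).map (fun t => (perm ++ [linha.getD i.1 0]) ++ t))
              = (gen (linha.eraseIdx i.1)).map (fun t => perm ++ (linha.getD i.1 0 :: t)) := by
            apply List.map_congr_left
            intro t _
            simp
          rw [this, List.append_assoc]
      rw [aux]
      congr 1
      rw [List.map_flatten, List.map_map]
      congr 1
      apply List.map_congr_left
      intro i _
      simp [List.map_map, Function.comp]

theorem permuta_eq_gen (linha : List Int) (perm : List Int) (perms : List (List Int)) :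
    permuta linha perm perms = perms ++ (gen linha).map (fun t => perm ++ t) :=
  permuta_eq_gen_aux linha.length linha le_rfl perm perms

theorem gen_head_aux (n : Nat) :
    ∀ l : List Int, l.length ≤ n → ∃ r, gen l = l :: r := by
  induction n with
  | zero =>
    intro l hl
    have : l = [] := List.eq_nil_of_length_eq_zero (Nat.le_zero.mp hl)
    subst this
    exact ⟨[], by simp [gen]⟩
  | succ n ih =>
    intro l hl
    match l with
    | [] => exact ⟨[], by simp [gen]⟩
    | a :: t =>
      obtain ⟨r, hr⟩ := ih t (by simpa using Nat.succ_le_succ_iff.mp hl)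
      rw [gen]
      simp only [if_neg (by simp : ¬((a :: t : List Int) = []))]
      rw [List.length_cons, List.range_succ_eq_map, List.attach_cons, List.map_cons,
        List.flatten_cons]
      simp only [List.getD_cons_zero, List.eraseIdx_cons_zero]
      rw [hr]
      simp only [List.map_cons, List.cons_append]
      exact ⟨_, rfl⟩

theorem gen_head (l : List Int) : ∃ r, gen l = l :: r := gen_head_aux l.length l le_rfl

theorem perm_eraseIdx (l : List Int) (i : Nat) (hi : i < l.length) :
    l.Perm (l[i] :: l.eraseIdx i) := by
  conv_lhs => rw [← List.take_append_drop i l, ← List.getElem_cons_drop hi]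
  rw [List.eraseIdx_eq_take_drop_succ]
  exact List.perm_middle

theorem mem_gen_of_perm (q : List Int) : ∀ l, q.Perm l → q ∈ gen l := by
  induction q with
  | nil =>
    intro l h
    have : l = [] := h.symm.eq_nil
    subst this
    simp [gen]
  | cons c t ihq =>
    intro l h
    have hc : c ∈ l := h.subset (List.mem_cons_self ..)
    obtain ⟨i, hi, hgi⟩ := List.getElem_of_mem hc
    have hne : l ≠ [] := by
      intro hnil; subst hnil; simp at hc
    have hperm : t.Perm (l.eraseIdx i) := by
      have h2 : (c :: t).Perm (c :: l.eraseIdx i) := by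
        refine h.trans ?_
        rw [← hgi]
        exact perm_eraseIdx l i hi
      exact h2.cons_inv
    rw [gen]
    simp only [if_neg hne]
    rw [List.mem_flatten]
    refine ⟨(gen (l.eraseIdx i)).map (fun s => l.getD i 0 :: s),
      List.mem_map.mpr ⟨⟨i, List.mem_range.mpr hi⟩, List.mem_attach _ _, rfl⟩, ?_⟩
    rw [List.mem_map]
    exact ⟨t, ihq _ hperm, by rw [List.getD_eq_getElem l 0 hi, hgi]⟩

theorem perm_of_mem_gen_aux (n : Nat) :
    ∀ l : List Int, l.length ≤ n → ∀ q ∈ gen l, q.Perm l := by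
  induction n with
  | zero =>
    intro l hl q hq
    have : l = [] := List.eq_nil_of_length_eq_zero (Nat.le_zero.mp hl)
    subst this
    simp [gen] at hq
    subst hq
    exact List.Perm.refl _
  | succ n ih =>
    intro l hl q hq
    by_cases h : l = []
    · subst h
      simp [gen] at hq
      subst hq
      exact List.Perm.refl _
    · rw [gen] at hq
      simp only [if_neg h] at hq
      rw [List.mem_flatten] at hq
      obtain ⟨block, hblock, hqb⟩ := hq
      rw [List.mem_map] at hblock
      obtain ⟨i, _, hib⟩ := hblock
      subst hib
      rw [List.mem_map] at hqb
      obtain ⟨t, ht, hqt⟩ := hqb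
      subst hqt
      have hi : i.1 < l.length := by simpa [List.mem_range] using i.2
      have hlen : (l.eraseIdx i.1).length ≤ n := by
        simp [List.length_eraseIdx, hi]; omega
      have := ih _ hlen t ht
      rw [List.getD_eq_getElem l 0 hi]
      exact ((this.cons l[i.1]).trans (perm_eraseIdx l i.1 hi).symm)

theorem perm_of_mem_gen (l : List Int) (q : List Int) (hq : q ∈ gen l) : q.Perm l :=
  perm_of_mem_gen_aux l.length l le_rfl q hq

theorem okB_iff (m : List (List Int)) :
    ∀ q k, okB m k q = true ↔
      ∀ j < q.length,
        PySem.List.pyGetD (PySem.List.pyGetD m ((k + j : Nat) : Int) []) (q.getD j 0) 0 ≠ 0 := by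
  intro q
  induction q with
  | nil => intro k; simp [okB]
  | cons c t ih =>
    intro k
    rw [okB]
    by_cases h0 : PySem.List.pyGetD (PySem.List.pyGetD m (k : Int) []) c 0 = 0
    · simp only [if_pos h0]
      constructor
      · intro h; cases h
      · intro hall
        exact absurd (by simpa using hall 0 (by simp)) (by simpa using h0)
    · simp only [if_neg h0]
      rw [ih (k + 1)]
      constructor
      · intro h j hj
        cases j with
        | zero => simpa using h0
        | succ j =>
          have := h j (by simpa using hj)
          have harith : k + 1 + j = k + (j + 1) := by omega
          rw [harith] at this
          simpa using this
      · intro h j hj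
        have := h (j + 1) (by simpa using hj)
        have harith : k + (j + 1) = k + 1 + j := by omega
        rw [harith] at this
        simpa using this

theorem not_haZero_eq_okB (m : List (List Int)) (q : List Int) (hq : q.length = m.length) :
    (!haZeroNaDiagonal m (PySem.List.pyRange 0 (m.length : Int) 1) q) = okB m 0 q := by
  rw [Bool.eq_iff_iff]
  rw [haZeroNaDiagonal]
  have hfun : (fun (qtd : Int) (pos : Nat) =>
        if PySem.List.pyGetD
            (PySem.List.pyGetD m
              (PySem.List.pyGetD (PySem.List.pyRange 0 (m.length : Int) 1) (pos : Int) 0) [])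
            (PySem.List.pyGetD q (pos : Int) 0) 0 = 0
        then qtd + 1 else qtd)
      = (fun qtd pos =>
          if (fun pos : Nat => decide (PySem.List.pyGetD
              (PySem.List.pyGetD m
                (PySem.List.pyGetD (PySem.List.pyRange 0 (m.length : Int) 1) (pos : Int) 0) [])
              (PySem.List.pyGetD q (pos : Int) 0) 0 = 0)) pos = true
          then qtd + 1 else qtd) := by
    funext qtd pos
    simp
  rw [hfun, PySem.List.foldl_count_if]
  rw [okB_iff]
  simp only [Bool.not_eq_eq_eq_not, Bool.not_true, decide_eq_false_iff_not]
  constructor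
  · intro hcount j hj
    rw [hq] at hj
    have hzero : List.countP (fun pos : Nat => decide (PySem.List.pyGetD
        (PySem.List.pyGetD m
          (PySem.List.pyGetD (PySem.List.pyRange 0 (m.length : Int) 1) (pos : Int) 0) [])
        (PySem.List.pyGetD q (pos : Int) 0) 0 = 0)) (List.range m.length) = 0 := by
      simp only [Bool.not_eq_eq_eq_not] at hcount
      omega
    rw [List.countP_eq_zero] at hzero
    have := hzero j (List.mem_range.mpr hj)
    rw [PySem.List.pyRange_zero_natCast, PySem.List.pyGetD_natCast,
      PySem.List.getD_map_range _ _ _ _ hj, PySem.List.pyGetD_natCast,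
      PySem.List.pyGetD_natCast] at this
    simp only [decide_eq_true_eq] at this
    simpa [PySem.List.pyGetD_natCast] using this
  · intro hall
    simp only [not_lt]
    have hzero : List.countP (fun pos : Nat => decide (PySem.List.pyGetD
        (PySem.List.pyGetD m
          (PySem.List.pyGetD (PySem.List.pyRange 0 (m.length : Int) 1) (pos : Int) 0) [])
        (PySem.List.pyGetD q (pos : Int) 0) 0 = 0)) (List.range m.length) = 0 := by
      rw [List.countP_eq_zero]
      intro j hj
      rw [List.mem_range] at hj
      have := hall j (by omega)
      rw [PySem.List.pyRange_zero_natCast, PySem.List.pyGetD_natCast,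
        PySem.List.getD_map_range _ _ _ _ hj, PySem.List.pyGetD_natCast,
        PySem.List.pyGetD_natCast]
      simpa [PySem.List.pyGetD_natCast] using this
    omega

theorem find?_congr_mem {α : Type} (l : List α) (p p' : α → Bool)
    (h : ∀ x ∈ l, p x = p' x) : l.find? p = l.find? p' := by
  induction l with
  | nil => rfl
  | cons x xs ih =>
    rw [List.find?_cons, List.find?_cons, h x (List.mem_cons_self ..)]
    cases hp : p' x with
    | true => rfl
    | false => exact ih (fun y hy => h y (List.mem_cons_of_mem _ hy))

theorem findSome?_congr_mem {α β : Type} (l : List α) (f g : α → Option β)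
    (h : ∀ x ∈ l, f x = g x) : l.findSome? f = l.findSome? g := by
  induction l with
  | nil => rfl
  | cons x xs ih =>
    rw [List.findSome?_cons, List.findSome?_cons, h x (List.mem_cons_self ..),
      ih (fun y hy => h y (List.mem_cons_of_mem _ hy))]

theorem searchB_eq_find_aux (m : List (List Int)) (n : Nat) :
    ∀ cols : List Int, cols.length ≤ n → ∀ k,
      searchB m k cols = (gen cols).find? (okB m k) := by
  induction n with
  | zero =>
    intro cols hl k
    have : cols = [] := List.eq_nil_of_length_eq_zero (Nat.le_zero.mp hl)
    subst this
    simp [searchB, gen, okB]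
  | succ n ih =>
    intro cols hl k
    by_cases h : cols = []
    · subst h; simp [searchB, gen, okB]
    · rw [searchB, gen]
      simp only [if_neg h]
      rw [List.find?_flatten, List.findSome?_map]
      apply findSome?_congr_mem
      intro i _
      have hi : i.1 < cols.length := by simpa [List.mem_range] using i.2
      have hlen : (cols.eraseIdx i.1).length ≤ n := by
        simp [List.length_eraseIdx, hi]; omega
      rw [slice_pair_eq_eraseIdx]
      simp only [PySem.List.pyGetD_natCast, Function.comp]
      by_cases h0 : PySem.List.pyGetD (m.getD k []) (cols.getD i.1 0) 0 = 0
      · rw [if_neg (not_not_intro h0)]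
        rw [List.find?_map]
        rw [List.find?_eq_none.mpr ?_]
        · rfl
        · intro t _
          simp only [Function.comp_apply]
          rw [okB, PySem.List.pyGetD_natCast, if_pos h0]
          simp
      · rw [if_pos h0]
        rw [List.find?_map, ih _ hlen (k + 1)]
        congr 1
        apply find?_congr_mem
        intro t _
        simp only [Function.comp_apply]
        rw [okB, PySem.List.pyGetD_natCast, if_neg h0]

theorem searchB_eq_find (m : List (List Int)) (cols : List Int) (k : Nat) :
    searchB m k cols = (gen cols).find? (okB m k) :=
  searchB_eq_find_aux m cols.length cols le_rfl k

theorem map_getD_range (l : List Int) (f : Int → List Int) :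
    (List.range l.length).map (fun i => f (l.getD i 0)) = l.map f := by
  apply List.ext_getElem
  · simp
  · intro n h1 h2
    have hn : n < l.length := by simpa using h1
    simp only [List.getElem_map, List.getElem_range]
    rw [List.getD_eq_getElem l 0 hn]

-- ===== VERDICT (by name: the statement is the Claim_ definition above) =====
theorem changeLines_spec : Claim_equal_changeLines := by
  intro m _ hpre
  obtain ⟨hrows, q0, hq0mem, hq0⟩ := hpre
  unfold Spec_changeLines
  have hidl : (PySem.List.pyRange 0 (m.length : Int) 1)
      = (List.range m.length).map (fun k : Nat => (k : Int)) :=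
    PySem.List.pyRange_zero_natCast m.length
  have hlenidl : (PySem.List.pyRange 0 (m.length : Int) 1).length = m.length := by
    rw [hidl]; simp
  have hq0perm : q0.Perm (List.range m.length) := List.mem_permutations.mp hq0mem
  have hq'perm : (q0.map (fun x : Nat => (x : Int))).Perm
      (PySem.List.pyRange 0 (m.length : Int) 1) := by
    rw [hidl]; exact hq0perm.map _
  have hq'len : (q0.map (fun x : Nat => (x : Int))).length = m.length := by
    rw [hq'perm.length_eq, hlenidl]
  have hq0len : q0.length = m.length := by simpa using hq'len
  have hpred : okB m 0 (q0.map (fun x : Nat => (x : Int))) = true := by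
    rw [okB_iff]
    intro j hj
    rw [hq'len] at hj
    have hjq : j < q0.length := by omega
    rw [List.getD_eq_getElem _ 0 (by simpa using hjq), List.getElem_map]
    rw [PySem.List.pyGetD_natCast, PySem.List.pyGetD_natCast]
    have := hq0 j (by omega)
    rw [List.getD_eq_getElem q0 0 hjq] at this
    simpa using this
  have hex : ∃ x ∈ gen (PySem.List.pyRange 0 (m.length : Int) 1), okB m 0 x = true :=
    ⟨_, mem_gen_of_perm _ _ hq'perm, hpred⟩
  obtain ⟨qstar, hqstar⟩ := Option.isSome_iff_exists.mp (List.find?_isSome.mpr hex)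
  have hqstar_mem : qstar ∈ gen (PySem.List.pyRange 0 (m.length : Int) 1) :=
    List.mem_of_find?_eq_some hqstar
  have hcong : (gen (PySem.List.pyRange 0 (m.length : Int) 1)).find?
        (fun q => !haZeroNaDiagonal m (PySem.List.pyRange 0 (m.length : Int) 1) q)
      = (gen (PySem.List.pyRange 0 (m.length : Int) 1)).find? (okB m 0) := by
    apply find?_congr_mem
    intro x hx
    have hxlen : x.length = m.length := by
      rw [(perm_of_mem_gen _ x hx).length_eq, hlenidl]
    exact not_haZero_eq_okB m x hxlen
  have hinner : (gen (PySem.List.pyRange 0 (m.length : Int) 1)).find?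
        (fun q => !haZeroNaDiagonal m (PySem.List.pyRange 0 (m.length : Int) 1) q)
      = some qstar := hcong.trans hqstar
  have hcomo : comoSeLivrarDeZerosNaDiagonal m
      = some (PySem.List.pyRange 0 (m.length : Int) 1, qstar) := by
    have hperms : permutacoes (PySem.List.pyRange 0 (m.length : Int) 1)
        = gen (PySem.List.pyRange 0 (m.length : Int) 1) := by
      rw [permutacoes, permuta_eq_gen]
      simp
    obtain ⟨r, hr⟩ := gen_head (PySem.List.pyRange 0 (m.length : Int) 1)
    simp only [comoSeLivrarDeZerosNaDiagonal]
    rw [hperms]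
    rw [hr] at hinner ⊢
    rw [List.findSome?_cons]
    simp only [hinner, Option.map_some]
  have hA : changeLines m = qstar.map (fun c => PySem.List.pyGetD m c []) := by
    unfold changeLines
    rw [hcomo]
    simp only []
    rw [PySem.List.foldl_append_singleton_eq_map
      (fun counter : Nat => PySem.List.pyGetD m (PySem.List.pyGetD qstar (counter : Int) 0) [])
      (List.range qstar.length) []]
    rw [List.nil_append]
    simp only [PySem.List.pyGetD_natCast]
    exact map_getD_range qstar (fun v => PySem.List.pyGetD m v [])
  have hB : changeLines_alt m = qstar.map (fun c => PySem.List.pyGetD m c []) := by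
    unfold changeLines_alt
    rw [searchB_eq_find, hqstar]
  rw [hA, hB]
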